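-- pv_equiv track=rewrite | github.com/dshap474/numereng | src/numereng/features/ensemble/selection.py | _era_ranges
-- ===== SOURCE A (Python) =====
-- def _era_ranges(eras: list[str]) -> tuple[tuple[str, int, int], ...]:
--     if not eras:
--         return ()
--     rows: list[tuple[str, int, int]] = []
--     start = 0
--     current = eras[0]
--     for index, era in enumerate(eras[1:], start=1):
--         if era == current:
--             continue
--         rows.append((current, start, index))
--         current = era
--         start = index
--     rows.append((current, start, len(eras)))
--     return tuple(rows)
-- ===== SOURCE B (Python) =====
-- from itertools import groupby
--
--
-- def _era_ranges(eras: list[str]) -> tuple[tuple[str, int, int], ...]: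
--     rows = []
--     cursor = 0
--     for key, group in groupby(eras):
--         length = sum(1 for _ in group)
--         rows.append((key, cursor, cursor + length))
--         cursor += length
--     return tuple(rows)
-- ===== Notes on version B (the rewrite author's own statement) =====
-- stated objective: idiomatic
-- what changed: Replaces the manual indexed break-detection loop (enumerate from 1, carrying start/current and a trailing append) with itertools.groupby over the runs plus a length cursor; the empty list falls out naturally instead of a special case.
import Mathlib
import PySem

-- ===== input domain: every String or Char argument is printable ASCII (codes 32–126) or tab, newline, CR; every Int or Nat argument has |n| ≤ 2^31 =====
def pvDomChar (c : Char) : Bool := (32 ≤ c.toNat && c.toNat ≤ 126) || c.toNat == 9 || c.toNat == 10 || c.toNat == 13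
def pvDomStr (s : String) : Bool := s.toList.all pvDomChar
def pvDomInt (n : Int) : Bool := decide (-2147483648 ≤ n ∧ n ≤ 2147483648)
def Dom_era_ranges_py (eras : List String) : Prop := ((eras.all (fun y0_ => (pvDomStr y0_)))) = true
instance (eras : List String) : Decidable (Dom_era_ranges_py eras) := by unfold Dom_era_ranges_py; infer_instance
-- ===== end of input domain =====

-- B replaces A's manual indexed break-detection loop by grouping consecutive equal
-- eras (itertools.groupby) with a length cursor; same O(n) cost, more idiomatic.

-- ===== PORT A =====
-- the for-loop over enumerate(eras[1:], start=1) with state (rows, start, current)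
def eraLoopA : List (Int × String) → List (String × Int × Int) → Int → String →
    (List (String × Int × Int)) × Int × String
  | [], rows, start, current => (rows, start, current)
  | (index, era) :: t, rows, start, current =>
    if era == current then eraLoopA t rows start current
    else eraLoopA t (rows ++ [(current, start, index)]) index era

def era_ranges_py (eras : List String) : List (String × Int × Int) :=
  match eras with
  | [] => []
  | e0 :: rest =>
    let r := eraLoopA (PySem.List.enumerate rest 1) [] 0 e0
    r.1 ++ [(r.2.2, r.2.1, (eras.length : Int))]

-- ===== PORT B =====
-- groupby: split off the leading run of elements equal to x (run count, remainder)
def takeRun (x : String) : List String → Nat × List String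
  | [] => (0, [])
  | y :: ys => if y == x then ((takeRun x ys).1 + 1, (takeRun x ys).2) else (0, y :: ys)

theorem takeRun_len (x : String) (l : List String) :
    (takeRun x l).2.length + (takeRun x l).1 = l.length := by
  induction l with
  | nil => simp [takeRun]
  | cons y ys ih =>
    by_cases h : (y == x) = true
    · simp [takeRun, h]; omega
    · simp [takeRun, h]

-- the groupby loop with the cursor
def eraRunsB : List String → Int → List (String × Int × Int)
  | [], _ => []
  | x :: xs, cursor =>
    let p := takeRun x xs
    let len : Int := (p.1 : Int) + 1
    (x, cursor, cursor + len) :: eraRunsB p.2 (cursor + len)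
termination_by l _ => l.length
decreasing_by
  have := takeRun_len x xs
  simp only [List.length_cons]
  omega

def era_ranges_py_alt (eras : List String) : List (String × Int × Int) :=
  eraRunsB eras 0

-- ===== PRECONDITION & SPEC =====
def Spec_era_ranges_py (eras : List String) (out : List (String × Int × Int)) : Prop := out = era_ranges_py_alt eras
instance (eras : List String) (out : List (String × Int × Int)) : Decidable (Spec_era_ranges_py eras out) := by unfold Spec_era_ranges_py; infer_instance

-- ===== CLAIM (what is proved, stated in full; the proofs are below) =====
def Claim_equal_era_ranges_py : Prop := ∀ (eras : List String), Dom_era_ranges_py eras → Spec_era_ranges_py eras (era_ranges_py eras)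

-- ===== LEMMAS AND PROOFS =====

theorem takeRun_head {x y : String} {l ys : List String}
    (h : (takeRun x l).2 = y :: ys) : (y == x) = false := by
  induction l with
  | nil => simp [takeRun] at h
  | cons z zs ih =>
    by_cases hz : (z == x) = true
    · exact ih (by simpa [takeRun, hz] using h)
    · simp [takeRun, hz] at h
      rcases h with ⟨h1, _⟩
      rw [← h1]
      simpa using hz

-- A's loop silently skips the leading run of elements equal to current
theorem eraLoopA_skip (l : List String) : ∀ (j s : Int) (current : String)
    (rows : List (String × Int × Int)),
    eraLoopA (PySem.List.enumerate l j) rows s current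
      = eraLoopA (PySem.List.enumerate (takeRun current l).2 (j + ((takeRun current l).1 : Int)))
          rows s current := by
  induction l with
  | nil => simp [takeRun]
  | cons y ys ih =>
    intro j s current rows
    by_cases h : (y == current) = true
    · have ht : takeRun current (y :: ys)
          = ((takeRun current ys).1 + 1, (takeRun current ys).2) := by
        simp [takeRun, h]
      rw [PySem.List.enumerate_cons, ht]
      simp only [eraLoopA, h, if_true]
      rw [ih (j + 1) s current rows]
      have harith : j + 1 + ((takeRun current ys).1 : Int)
          = j + (((takeRun current ys).1 + 1 : Nat) : Int) := by push_cast; ring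
      rw [harith]
    · simp [takeRun, h]

-- the main invariant: finishing A's loop (with its trailing append) builds B's runs
theorem eraLoop_main : ∀ (n : Nat) (l : List String), l.length = n →
    ∀ (s : Int) (current : String) (rows : List (String × Int × Int)),
    (eraLoopA (PySem.List.enumerate l (s + 1)) rows s current).1
      ++ [((eraLoopA (PySem.List.enumerate l (s + 1)) rows s current).2.2,
           (eraLoopA (PySem.List.enumerate l (s + 1)) rows s current).2.1,
           s + 1 + (l.length : Int))]
      = rows ++ eraRunsB (current :: l) s := by
  intro n
  induction n using Nat.strong_induction_on with
  | _ n ih =>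
    intro l hl s current rows
    have hlen := takeRun_len current l
    rw [eraLoopA_skip]
    rcases hrest : (takeRun current l).2 with _ | ⟨y, ys⟩
    · -- the whole tail matches current: one final row
      rw [hrest] at hlen
      simp only [PySem.List.enumerate_nil, eraLoopA, eraRunsB]
      rw [hrest]
      simp only [eraRunsB]
      have h1 : s + 1 + (l.length : Int) = s + (((takeRun current l).1 : Int) + 1) := by
        simp at hlen; omega
      rw [h1]
    · -- run boundary: append the finished row, recurse on the rest
      have hy : (y == current) = false := takeRun_head hrest
      have hlen2 := takeRun_len current l
      rw [hrest] at hlen2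
      simp only [List.length_cons] at hlen2
      rw [PySem.List.enumerate_cons]
      simp only [eraLoopA, hy]
      simp only [Bool.false_eq_true, if_false]
      have hys : ys.length < n := by omega
      have hstep := ih ys.length hys ys rfl (s + 1 + ((takeRun current l).1 : Int))
        y (rows ++ [(current, s, s + 1 + ((takeRun current l).1 : Int))])
      have hend : s + 1 + ((takeRun current l).1 : Int) + 1 + (ys.length : Int)
          = s + 1 + (l.length : Int) := by omega
      rw [hend] at hstep
      rw [hstep]
      have hruns : eraRunsB (current :: l) s
          = (current, s, s + (((takeRun current l).1 : Int) + 1))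
            :: eraRunsB (y :: ys) (s + (((takeRun current l).1 : Int) + 1)) := by
        conv_lhs => rw [eraRunsB]
        rw [hrest]
      have h2 : s + (((takeRun current l).1 : Int) + 1)
          = s + 1 + ((takeRun current l).1 : Int) := by ring
      rw [h2] at hruns
      rw [hruns]
      simp

-- ===== VERDICT (by name: the statement is the Claim_ definition above) =====
theorem era_ranges_py_spec : Claim_equal_era_ranges_py := by
  intro eras _
  unfold Spec_era_ranges_py era_ranges_py era_ranges_py_alt
  match eras with
  | [] => simp [eraRunsB]
  | e0 :: rest =>
    have h := eraLoop_main rest.length rest rfl 0 e0 []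
    simp only [zero_add, List.nil_append] at h
    simp only [List.length_cons]
    rw [show ((rest.length + 1 : Nat) : Int) = 0 + 1 + (rest.length : Int) by push_cast; ring]
    exact h
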